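-- pv_equiv track=rewrite | github.com/baptistelabat/braidpy | src/braidpy/handles_reduction.py | dehornoy_handle_indices
-- ===== SOURCE A (Python) =====
-- def dehornoy_handle_indices(gens):
--     """
--     Detect the first Dehornoy handle in gens.
--     A handle is of the form g ... g^-1, with all intermediates having strictly larger absolute values.
--     Returns (i, j) — the indices of g and g^-1 — for the first such valid handle.
--     """
--     n = len(gens)
--
--     for j in range(1, n):
--         g = -gens[j]  # we're looking for a gens[i] == -gens[j]
--         for i in range(j):
--             if gens[i] == g:
--                 # Check all between gens[i+1 : j] are strictly larger in absolute value
--                 if all(abs(h) > abs(g) for h in gens[i + 1 : j]):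
--                     return i, j  # first such handle found
--     return None
-- ===== SOURCE B (Python) =====
-- def dehornoy_handle_indices(gens):
--     # Single left-to-right pass with a monotone stack of indices (abs values
--     # non-increasing from top to bottom after each step).  For each j, popping
--     # every stacked index with abs > abs(gens[j]) leaves as top the only
--     # possible handle start for j; test it and push j.  O(n) amortized.
--     stack = []
--     for j, gj in enumerate(gens):
--         a = abs(gj)
--         while stack and abs(gens[stack[-1]]) > a:
--             stack.pop()
--         if stack and gens[stack[-1]] == -gj:
--             return stack[-1], j
--         stack.append(j)
--     return None
-- ===== Notes on version B (the rewrite author's own statement) =====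
-- stated objective: faster
-- what changed: Replaces A's nested scan over all i<j with a slice re-check per candidate (O(n^3)) by a single left-to-right pass maintaining a monotone stack of indices, so each j tests exactly one candidate start and each index is pushed/popped once (O(n)).
import Mathlib
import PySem

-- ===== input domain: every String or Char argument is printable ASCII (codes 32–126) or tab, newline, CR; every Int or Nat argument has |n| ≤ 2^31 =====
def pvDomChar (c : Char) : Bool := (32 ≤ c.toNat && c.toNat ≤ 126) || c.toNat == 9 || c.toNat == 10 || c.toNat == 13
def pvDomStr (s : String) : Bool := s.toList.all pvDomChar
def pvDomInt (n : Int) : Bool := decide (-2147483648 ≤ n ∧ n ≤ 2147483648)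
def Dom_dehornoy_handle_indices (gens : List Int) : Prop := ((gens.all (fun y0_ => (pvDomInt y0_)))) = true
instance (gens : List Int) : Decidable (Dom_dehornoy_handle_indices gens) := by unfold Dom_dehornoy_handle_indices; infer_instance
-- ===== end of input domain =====

-- B replaces A's nested scans (every i<j, re-checking the whole intermediate slice) by one
-- left-to-right pass with a monotone stack of indices, testing a single candidate per j.

-- ===== PORT A =====
-- inner loop: 'for i in range(j): if gens[i] == g: if all(abs(h) > abs(g) for h in gens[i+1:j]): return i, j'
def pvAInner (gens : List Int) (g : Int) (j i : Nat) : Option (List Int) :=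
  if _h : i < j then
    if PySem.List.pyGetD gens (i : Int) 0 = g then
      if (PySem.List.slice gens (some ((i : Int) + 1)) (some (j : Int))).all
          (fun hh => g.natAbs < hh.natAbs) then
        some [(i : Int), (j : Int)]
      else pvAInner gens g j (i + 1)
    else pvAInner gens g j (i + 1)
  else none
termination_by j - i

-- outer loop: 'for j in range(1, n): …; return None'
def pvAOuter (gens : List Int) (n j : Nat) : Option (List Int) :=
  if _h : j < n then
    match pvAInner gens (-(PySem.List.pyGetD gens (j : Int) 0)) j 0 with
    | some r => some r
    | none => pvAOuter gens n (j + 1)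
  else none
termination_by n - j

def dehornoy_handle_indices (gens : List Int) : Option (List Int) :=
  pvAOuter gens gens.length 1

-- ===== PORT B =====
-- 'while stack and abs(gens[stack[-1]]) > a: stack.pop()'  (stack top = list head)
def pvPop (gens : List Int) (a : Nat) : List Nat → List Nat
  | [] => []
  | t :: st => if a < (PySem.List.pyGetD gens (t : Int) 0).natAbs then pvPop gens a st else t :: st

-- 'for j, gj in enumerate(gens): …; return None'
def pvBLoop (gens : List Int) (st : List Nat) (j : Nat) : Option (List Int) :=
  if _h : j < gens.length then
    let gj := PySem.List.pyGetD gens (j : Int) 0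
    match pvPop gens gj.natAbs st with
    | t :: st' =>
      if PySem.List.pyGetD gens (t : Int) 0 = -gj then some [(t : Int), (j : Int)]
      else pvBLoop gens (j :: t :: st') (j + 1)
    | [] => pvBLoop gens [j] (j + 1)
  else none
termination_by gens.length - j

def dehornoy_handle_indices_alt (gens : List Int) : Option (List Int) :=
  pvBLoop gens [] 0

-- ===== PRECONDITION & SPEC =====
def Spec_dehornoy_handle_indices (gens : List Int) (out : Option (List Int)) : Prop := out = dehornoy_handle_indices_alt gens
instance (gens : List Int) (out : Option (List Int)) : Decidable (Spec_dehornoy_handle_indices gens out) := by unfold Spec_dehornoy_handle_indices; infer_instance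

-- ===== CLAIM (what is proved, stated in full; the proofs are below) =====
def Claim_equal_dehornoy_handle_indices : Prop := ∀ (gens : List Int), Dom_dehornoy_handle_indices gens → Spec_dehornoy_handle_indices gens (dehornoy_handle_indices gens)

-- ===== LEMMAS AND PROOFS =====

-- 'Big m': the entry at m is strictly larger in absolute value than g
def pvBig (gens : List Int) (g : Int) (m : Nat) : Prop := g.natAbs < (gens.getD m 0).natAbs

-- 'Valid i j': i is a handle start for the closer at j
def pvValid (gens : List Int) (g : Int) (i j : Nat) : Prop :=
  i < j ∧ gens.getD i 0 = g ∧ ∀ m, i < m → m < j → pvBig gens g m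

-- 'Visible m from j': no index strictly between m and j has smaller absolute value
def pvVis (gens : List Int) (j m : Nat) : Prop :=
  m < j ∧ ∀ m', m < m' → m' < j → (gens.getD m 0).natAbs ≤ (gens.getD m' 0).natAbs

-- stack invariant: strictly decreasing indices; membership = visibility from j
def pvInv (gens : List Int) (j : Nat) (st : List Nat) : Prop :=
  List.Pairwise (· > ·) st ∧ ∀ m, m ∈ st ↔ pvVis gens j m

-- reference scan used ONLY in proofs (not by either port): leftward search characterizing pvValid
def pvBScan (gens : List Int) (g : Int) (j : Nat) : Nat → Option (List Int)
  | 0 => none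
  | k + 1 =>
    if (gens.getD k 0).natAbs ≤ g.natAbs then
      if gens.getD k 0 = g then some [(k : Int), (j : Int)] else none
    else pvBScan gens g j k

-- the slice-based all() of A computes exactly the 'all intermediates big' condition
lemma pv_slice_all (gens : List Int) (g : Int) (i j : Nat) (hij : i < j) (hj : j ≤ gens.length) :
    ((PySem.List.slice gens (some ((i : Int) + 1)) (some (j : Int))).all
      (fun hh => g.natAbs < hh.natAbs) = true)
    ↔ (∀ m, i < m → m < j → pvBig gens g m) := by
  have hcast : ((i : Int) + 1) = ((i + 1 : Nat) : Int) := by push_cast; ring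
  rw [hcast, PySem.List.slice_natCast, List.all_eq_true]
  constructor
  · intro hall m him hmj
    have hm : m - (i+1) < ((gens.drop (i+1)).take (j - (i+1))).length := by
      simp [List.length_take, List.length_drop]; omega
    have := hall (((gens.drop (i+1)).take (j - (i+1)))[m - (i+1)]) (by exact List.getElem_mem hm)
    have hget : ((gens.drop (i+1)).take (j - (i+1)))[m - (i+1)] = gens[m]'(by omega) := by
      rw [List.getElem_take, List.getElem_drop]
      congr 1; omega
    rw [hget] at this
    simpa [pvBig, List.getD_eq_getElem?_getD, List.getElem?_eq_getElem (by omega : m < gens.length)]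
      using this
  · intro hcl x hx
    obtain ⟨k, hk, hxk⟩ := List.mem_iff_getElem.mp hx
    have hk' : k < j - (i+1) := by
      have := hk; simp [List.length_take, List.length_drop] at this; omega
    have hkg : k + (i+1) < gens.length := by omega
    have hget : ((gens.drop (i+1)).take (j - (i+1)))[k] = gens[i+1+k]'(by omega) := by
      rw [List.getElem_take, List.getElem_drop]
    have := hcl (i+1+k) (by omega) (by omega)
    simp only [pvBig, List.getD_eq_getElem?_getD,
      List.getElem?_eq_getElem (by omega : i+1+k < gens.length)] at this
    simp only [← hxk, hget]
    simpa using this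

-- characterization of the reference scan
lemma pv_bscan_iff (gens : List Int) (g : Int) (j : Nat) :
    ∀ k r, pvBScan gens g j k = some r ↔
      ∃ i : Nat, r = [(i : Int), (j : Int)] ∧ i < k ∧ gens.getD i 0 = g ∧
        ∀ m, i < m → m < k → pvBig gens g m := by
  intro k
  induction k with
  | zero => intro r; simp [pvBScan]
  | succ k ih =>
    intro r
    simp only [pvBScan]
    by_cases hle : (gens.getD k 0).natAbs ≤ g.natAbs
    · rw [if_pos hle]
      by_cases hP : gens.getD k 0 = g
      · rw [if_pos hP]
        constructor
        · rintro ⟨rfl⟩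
          exact ⟨k, rfl, Nat.lt_succ_self k, hP, fun m hm hm' => by omega⟩
        · rintro ⟨i, rfl, hik, hPi, hcl⟩
          have : i = k := by
            by_contra hne
            have := hcl k (by omega) (Nat.lt_succ_self k)
            simp only [pvBig] at this; omega
          subst this; rfl
      · rw [if_neg hP]
        constructor
        · intro h; cases h
        · rintro ⟨i, rfl, hik, hPi, hcl⟩
          by_cases hik' : i = k
          · subst hik'; exact absurd hPi hP
          · have := hcl k (by omega) (Nat.lt_succ_self k)
            simp only [pvBig] at this; omega
    · rw [if_neg hle, ih r]
      constructor
      · rintro ⟨i, rfl, hik, hPi, hcl⟩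
        refine ⟨i, rfl, by omega, hPi, fun m hm hm' => ?_⟩
        by_cases hmk : m = k
        · subst hmk; simp only [pvBig]; omega
        · exact hcl m hm (by omega)
      · rintro ⟨i, rfl, hik, hPi, hcl⟩
        have hik' : i ≠ k := by
          intro h; subst h
          apply hle; rw [hPi]
        exact ⟨i, rfl, by omega, hPi, fun m hm hm' => hcl m hm (by omega)⟩

-- A's forward inner scan agrees with the reference scan
lemma pv_inner_eq (gens : List Int) (g : Int) (j : Nat) (hj : j ≤ gens.length) :
    ∀ d i₀, j - i₀ = d → (∀ m, m < i₀ → ¬ pvValid gens g m j) →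
      pvAInner gens g j i₀ = pvBScan gens g j j := by
  intro d
  induction d with
  | zero =>
    intro i₀ hd hnv
    have hij : ¬ i₀ < j := by omega
    rw [pvAInner, dif_neg hij]
    rcases h : pvBScan gens g j j with _ | r
    · rfl
    · exfalso
      obtain ⟨i, _, hik, hPi, hcl⟩ := (pv_bscan_iff gens g j j r).mp h
      exact hnv i (by omega) ⟨hik, hPi, hcl⟩
  | succ d ih =>
    intro i₀ hd hnv
    have hij : i₀ < j := by omega
    rw [pvAInner, dif_pos hij]
    simp only [PySem.List.pyGetD_natCast]
    by_cases hP : gens.getD i₀ 0 = g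
    · rw [if_pos hP]
      by_cases hall : (PySem.List.slice gens (some ((i₀ : Int) + 1)) (some (j : Int))).all
          (fun hh => decide (g.natAbs < hh.natAbs)) = true
      · rw [if_pos hall]
        have hcl := (pv_slice_all gens g i₀ j hij hj).mp hall
        exact ((pv_bscan_iff gens g j j _).mpr ⟨i₀, rfl, hij, hP, hcl⟩).symm
      · rw [if_neg hall]
        apply ih (i₀ + 1) (by omega)
        intro m hm
        by_cases hmi : m = i₀
        · subst hmi
          intro ⟨_, _, hcl⟩
          exact hall ((pv_slice_all gens g m j hij hj).mpr hcl)
        · exact hnv m (by omega)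
    · rw [if_neg hP]
      apply ih (i₀ + 1) (by omega)
      intro m hm
      by_cases hmi : m = i₀
      · subst hmi; intro ⟨_, hPm, _⟩; exact hP hPm
      · exact hnv m (by omega)

-- the popped stack is a sublist of the original
lemma pv_pop_sublist (gens : List Int) (a : Nat) : ∀ st : List Nat, List.Sublist (pvPop gens a st) st := by
  intro st
  induction st with
  | nil => simp [pvPop]
  | cons t st ih =>
    rw [pvPop]
    split_ifs with h
    · exact ih.trans (List.sublist_cons_self t st)
    · exact List.Sublist.refl _

-- membership in the popped stack, given decreasing indices and abs-monotonicity
lemma pv_pop_mem (gens : List Int) (a : Nat) :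
    ∀ st : List Nat, List.Pairwise (· > ·) st →
      (∀ m m', m ∈ st → m' ∈ st → m' < m → (gens.getD m' 0).natAbs ≤ (gens.getD m 0).natAbs) →
      ∀ m, m ∈ pvPop gens a st ↔ m ∈ st ∧ (gens.getD m 0).natAbs ≤ a := by
  intro st
  induction st with
  | nil => intro _ _ m; simp [pvPop]
  | cons t st ih =>
    intro hpw hmono m
    rw [pvPop]
    simp only [PySem.List.pyGetD_natCast]
    rcases List.pairwise_cons.mp hpw with ⟨hgt, hpw'⟩
    split_ifs with h
    · rw [ih hpw' (fun x y hx hy => hmono x y (by simp [hx]) (by simp [hy])) m]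
      constructor
      · rintro ⟨hm, hle⟩; exact ⟨by simp [hm], hle⟩
      · rintro ⟨hm, hle⟩
        rcases List.mem_cons.mp hm with rfl | hm'
        · omega
        · exact ⟨hm', hle⟩
    · constructor
      · intro hm
        refine ⟨hm, ?_⟩
        rcases List.mem_cons.mp hm with rfl | hm'
        · omega
        · have := hmono t m (by simp) hm (hgt m hm')
          omega
      · exact fun h => h.1

lemma pv_inv_mono (gens : List Int) (j : Nat) (st : List Nat) (hinv : pvInv gens j st) :
    ∀ m m', m ∈ st → m' ∈ st → m' < m → (gens.getD m' 0).natAbs ≤ (gens.getD m 0).natAbs := by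
  intro m m' hm hm' hlt
  obtain ⟨_, hmem⟩ := hinv
  obtain ⟨hmj, _⟩ := (hmem m).mp hm
  obtain ⟨_, hvis'⟩ := (hmem m').mp hm'
  exact hvis' m hlt hmj

-- head of a strictly decreasing list is maximal
lemma pv_head_max (t : Nat) (st : List Nat) (hpw : List.Pairwise (· > ·) (t :: st)) :
    ∀ m ∈ t :: st, m ≤ t := by
  intro m hm
  rcases List.mem_cons.mp hm with rfl | hm'
  · exact le_refl m
  · exact le_of_lt ((List.pairwise_cons.mp hpw).1 m hm')

-- after popping with a = |gens[j]|, every index strictly above the head and below j is big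
lemma pv_above_head_big (gens : List Int) (j : Nat) (st : List Nat) (hinv : pvInv gens j st)
    (a : Nat) (t : Nat) (st' : List Nat) (hpop : pvPop gens a st = t :: st') :
    ∀ m, t < m → m < j → a < (gens.getD m 0).natAbs := by
  obtain ⟨hpw, hmem⟩ := hinv
  have hmono := pv_inv_mono gens j st ⟨hpw, hmem⟩
  have hpopmem := pv_pop_mem gens a st hpw hmono
  have hpw' : List.Pairwise (· > ·) (t :: st') := by
    rw [← hpop]; exact hpw.sublist (pv_pop_sublist gens a st)
  -- downward strong induction on j - m
  intro m
  induction' hd : j - m using Nat.strong_induction_on with d ih generalizing m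
  intro htm hmj
  by_contra hle
  push Not at hle
  -- m is visible from j: everything strictly between m and j is > a ≥ |gens[m]|
  have hvis : pvVis gens j m := by
    refine ⟨hmj, fun m' hmm' hm'j => ?_⟩
    have : a < (gens.getD m' 0).natAbs := ih (j - m') (by omega) m' rfl (by omega) hm'j
    omega
  have hmst : m ∈ pvPop gens a st := (hpopmem m).mpr ⟨(hmem m).mpr hvis, hle⟩
  rw [hpop] at hmst
  have := pv_head_max t st' hpw' m hmst
  omega

-- main loop equivalence under the invariant
lemma pv_main (gens : List Int) :
    ∀ d j st, gens.length - j = d → pvInv gens j st →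
      pvAOuter gens gens.length j = pvBLoop gens st j := by
  intro d
  induction d with
  | zero =>
    intro j st hd _
    have h : ¬ j < gens.length := by omega
    rw [pvAOuter, dif_neg h, pvBLoop, dif_neg h]
  | succ d ih =>
    intro j st hd hinv
    have h : j < gens.length := by omega
    obtain ⟨hpw, hmem⟩ := hinv
    have hmono := pv_inv_mono gens j st ⟨hpw, hmem⟩
    rw [pvAOuter, dif_pos h, pvBLoop, dif_pos h]
    simp only [PySem.List.pyGetD_natCast]
    set gj : Int := gens.getD j 0 with hgj
    set a : Nat := gj.natAbs with ha
    set g : Int := -gj with hg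
    have hga : g.natAbs = a := by rw [hg, ha]; exact Int.natAbs_neg gj
    have hpopmem := pv_pop_mem gens a st hpw hmono
    rw [pv_inner_eq gens g j (by omega) j 0 (by omega) (by intro m hm; omega)]
    -- invariant for the next step, given the new stack is j :: (pvPop gens a st)
    have hnext : ∀ st₀, pvPop gens a st = st₀ → pvInv gens (j + 1) (j :: st₀) := by
      intro st₀ hpop
      have hpw' : List.Pairwise (· > ·) st₀ := by
        rw [← hpop]; exact hpw.sublist (pv_pop_sublist gens a st)
      constructor
      · rw [List.pairwise_cons]
        refine ⟨fun m hm => ?_, hpw'⟩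
        rw [← hpop] at hm
        have := ((hpopmem m).mp hm).1
        exact ((hmem m).mp this).1
      · intro m
        constructor
        · intro hm
          rcases List.mem_cons.mp hm with rfl | hm'
          · exact ⟨Nat.lt_succ_self m, fun m' h1 h2 => by omega⟩
          · rw [← hpop] at hm'
            obtain ⟨hms, hle⟩ := (hpopmem m).mp hm'
            obtain ⟨hmj, hvis⟩ := (hmem m).mp hms
            refine ⟨by omega, fun m' h1 h2 => ?_⟩
            by_cases hm'j : m' = j
            · subst hm'j; omega
            · exact hvis m' h1 (by omega)
        · intro ⟨hmj1, hvis1⟩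
          by_cases hmj : m = j
          · subst hmj; simp
          · have hmj' : m < j := by omega
            have hvj : pvVis gens j m := ⟨hmj', fun m' h1 h2 => hvis1 m' h1 (by omega)⟩
            have hle : (gens.getD m 0).natAbs ≤ a := hvis1 j hmj' (Nat.lt_succ_self j)
            have : m ∈ pvPop gens a st := (hpopmem m).mpr ⟨(hmem m).mpr hvj, hle⟩
            rw [hpop] at this
            exact List.mem_cons_of_mem j this
    rcases hb : pvBScan gens g j j with _ | r
    · -- no handle closing at j: B must not return either
      have hnov : ∀ i, ¬ (i < j ∧ gens.getD i 0 = g ∧ ∀ m, i < m → m < j → pvBig gens g m) := by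
        intro i hi
        have : pvBScan gens g j j = some [(i : Int), (j : Int)] :=
          (pv_bscan_iff gens g j j _).mpr ⟨i, rfl, hi.1, hi.2.1, hi.2.2⟩
        rw [hb] at this; cases this
      rcases hpop : pvPop gens a st with _ | ⟨t, st'⟩
      · exact ih (j + 1) [j] (by omega) (hnext [] hpop)
      · have htne : ¬ gens.getD t 0 = g := by
          intro hPt
          have htmem : t ∈ t :: st' := by simp
          rw [← hpop] at htmem
          obtain ⟨hts, _⟩ := (hpopmem t).mp htmem
          have htj : t < j := ((hmem t).mp hts).1
          have hbig := pv_above_head_big gens j st ⟨hpw, hmem⟩ a t st' hpop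
          exact hnov t ⟨htj, hPt, fun m h1 h2 => by
            have := hbig m h1 h2; simp only [pvBig, hga]; omega⟩
        show pvAOuter gens gens.length (j + 1) =
          if gens.getD t 0 = g then some [(t : Int), (j : Int)]
          else pvBLoop gens (j :: t :: st') (j + 1)
        rw [if_neg htne]
        exact ih (j + 1) (j :: t :: st') (by omega) (hnext (t :: st') hpop)
    · -- a handle (i, j) exists: both return some [i, j]
      obtain ⟨i, rfl, hij, hPi, hcl⟩ := (pv_bscan_iff gens g j j _).mp hb
      -- i is in the popped stack
      have hvi : pvVis gens j i := by
        refine ⟨hij, fun m' h1 h2 => ?_⟩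
        have := hcl m' h1 h2
        simp only [pvBig, hga] at this
        have : a < (gens.getD m' 0).natAbs := this
        have hia : (gens.getD i 0).natAbs = a := by rw [hPi, hga]
        omega
      have hia : (gens.getD i 0).natAbs = a := by rw [hPi, hga]
      have himem : i ∈ pvPop gens a st := (hpopmem i).mpr ⟨(hmem i).mpr hvi, by omega⟩
      rcases hpop : pvPop gens a st with _ | ⟨t, st'⟩
      · rw [hpop] at himem; cases himem
      · -- the head t equals i
        have hpw' : List.Pairwise (· > ·) (t :: st') := by
          rw [← hpop]; exact hpw.sublist (pv_pop_sublist gens a st)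
        rw [hpop] at himem
        have hit : i ≤ t := pv_head_max t st' hpw' i himem
        have hti : t = i := by
          by_contra hne
          have htj : t < j := by
            have htmem : t ∈ t :: st' := by simp
            rw [← hpop] at htmem
            exact ((hmem t).mp ((hpopmem t).mp htmem).1).1
          have := hcl t (by omega) htj
          simp only [pvBig, hga] at this
          have htle : (gens.getD t 0).natAbs ≤ a := by
            have htmem : t ∈ t :: st' := by simp
            rw [← hpop] at htmem
            exact ((hpopmem t).mp htmem).2
          omega
        subst hti
        show some [(t : Int), (j : Int)] =
          if gens.getD t 0 = g then some [(t : Int), (j : Int)]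
          else pvBLoop gens (j :: t :: st') (j + 1)
        rw [if_pos hPi]

-- ===== VERDICT (by name: the statement is the Claim_ definition above) =====
theorem dehornoy_handle_indices_spec : Claim_equal_dehornoy_handle_indices := by
  intro gens _
  unfold Spec_dehornoy_handle_indices dehornoy_handle_indices dehornoy_handle_indices_alt
  rcases hn : gens.length with _ | n
  · rw [pvAOuter, dif_neg (by omega), pvBLoop, dif_neg (by omega)]
  · -- unfold B's first iteration (empty stack, j = 0), then apply the invariant lemma
    have h0 : 0 < gens.length := by omega
    have hinv : pvInv gens 1 [0] := by
      constructor
      · simp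
      · intro m
        constructor
        · intro hm
          have : m = 0 := by simpa using hm
          subst this
          exact ⟨by omega, fun m' h1 h2 => by omega⟩
        · intro ⟨h1, _⟩
          have : m = 0 := by omega
          simp [this]
    rw [pvBLoop, dif_pos h0]
    simp only [pvPop]
    rw [show (0 + 1 : Nat) = 1 from rfl, ← hn]
    exact pv_main gens (gens.length - 1) 1 [0] (by omega) hinv
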